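-- pv_equiv track=rewrite | github.com/TangentialDevelopment/Web-Development-Projects | MI 250/programs/existing programs before week 13/week 12 practice 1.py | writer
-- ===== SOURCE A (Python) =====
-- def writer(list):
--     final = ""
--     iterator = 0
--     for entry in list:
--         entry = str(entry)
--         if iterator != 2:
--             final += entry + ","
--             iterator += 1
--         else:
--             final += entry + "\n"
--             iterator = 0
--     return final
-- ===== SOURCE B (Python) =====
-- def writer(list):
--     parts = []
--     for i in range(0, len(list), 3):
--         chunk = list[i:i+3]
--         row = ",".join(str(e) for e in chunk)
--         parts.append(row + ("\n" if len(chunk) == 3 else ","))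
--     return "".join(parts)
-- ===== Notes on version B (the rewrite author's own statement) =====
-- stated objective: alternative
-- what changed: Replaced the per-element counter/branch loop with a row-wise decomposition: slice the list into chunks of 3, join each chunk with ',' and terminate it with '\n' (full chunk) or ',' (short chunk).
import Mathlib
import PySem

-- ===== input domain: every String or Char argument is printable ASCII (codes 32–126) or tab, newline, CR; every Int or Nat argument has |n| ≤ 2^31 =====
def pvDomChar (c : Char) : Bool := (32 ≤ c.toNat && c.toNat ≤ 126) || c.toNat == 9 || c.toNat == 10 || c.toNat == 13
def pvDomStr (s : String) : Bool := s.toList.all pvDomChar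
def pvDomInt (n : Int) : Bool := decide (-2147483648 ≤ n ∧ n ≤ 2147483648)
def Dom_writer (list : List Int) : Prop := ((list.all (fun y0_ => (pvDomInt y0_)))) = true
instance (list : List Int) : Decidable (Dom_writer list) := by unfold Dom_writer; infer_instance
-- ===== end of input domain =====

-- B rewrites A by a different decomposition: rows of three, joined with ',' and terminated per-row; same O(n) cost.

-- ===== PORT A =====
def writerStep (st : String × Int) (entry : Int) : String × Int :=
  if st.2 ≠ 2 then (st.1 ++ PySem.Int.toStr entry ++ ",", st.2 + 1)
  else (st.1 ++ PySem.Int.toStr entry ++ "\n", 0)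

def writer (list : List Int) : String :=
  (list.foldl writerStep ("", 0)).1

-- ===== PORT B =====
-- Source B walks the list in chunks of 3 (slices); ported as structural recursion consuming 3 at a time.
def writerRows : List Int → String
  | [] => ""
  | a :: b :: c :: rest =>
      PySem.Str.join "," [PySem.Int.toStr a, PySem.Int.toStr b, PySem.Int.toStr c] ++ "\n"
        ++ writerRows rest
  | chunk => PySem.Str.join "," (chunk.map PySem.Int.toStr) ++ ","

def writer_alt (list : List Int) : String := writerRows list

-- ===== PRECONDITION & SPEC =====
def Spec_writer (list : List Int) (out : String) : Prop := out = writer_alt list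
instance (list : List Int) (out : String) : Decidable (Spec_writer list out) := by unfold Spec_writer; infer_instance

-- ===== CLAIM (what is proved, stated in full; the proofs are below) =====
def Claim_equal_writer : Prop := ∀ (list : List Int), Dom_writer list → Spec_writer list (writer list)

-- ===== LEMMAS AND PROOFS =====
theorem join3 (x y z : String) : PySem.Str.join "," [x, y, z] = x ++ "," ++ y ++ "," ++ z := by
  apply String.toList_injective
  simp [PySem.Str.toList_join, PySem.Chars.join, List.intercalate, List.intersperse]

theorem join2 (x y : String) : PySem.Str.join "," [x, y] = x ++ "," ++ y := by
  apply String.toList_injective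
  simp [PySem.Str.toList_join, PySem.Chars.join, List.intercalate, List.intersperse]

theorem join1 (x : String) : PySem.Str.join "," [x] = x := by
  apply String.toList_injective
  simp [PySem.Str.toList_join, PySem.Chars.join, List.intercalate]

theorem foldA_eq (l : List Int) : ∀ (s : String),
    (l.foldl writerStep (s, 0)).1 = s ++ writerRows l := by
  induction l using writerRows.induct with
  | case1 =>
      intro s; simp [writerRows, List.foldl]
  | case2 a b c rest ih =>
      intro s
      simp only [List.foldl, writerStep]
      norm_num
      rw [ih]
      simp [writerRows, join3, String.append_assoc]
  | case3 chunk h1 h2 =>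
      intro s
      match chunk, h1, h2 with
      | [], h1, _ => exact (h1 rfl).elim
      | a :: b :: c :: r, _, h2 => exact (h2 a b c r rfl).elim
      | [a], _, _ =>
          simp [writerRows, List.foldl, writerStep, join1, String.append_assoc]
      | [a, b], _, _ =>
          simp [writerRows, List.foldl, writerStep, join2, String.append_assoc]

-- ===== VERDICT (by name: the statement is the Claim_ definition above) =====
theorem writer_spec : Claim_equal_writer := by
  intro l _
  unfold Spec_writer writer writer_alt
  rw [foldA_eq]
  simp
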